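-- pv_equiv track=rewrite | github.com/Camilo-6/PrimerSemestre | ED/Practicas ED/ED-P3/practica3.py | consonan_auxi
-- ===== SOURCE A (Python) =====
-- def consonan_auxi(cadena, total, contador):
--     if contador >= total:
--         return cadena
--     wow = list(cadena)
--     if (cadena[contador] == "a" or cadena[contador] == "e" or cadena[contador] == "i" or cadena[contador] == "o" or cadena[contador] == "u" or cadena[contador] == " "):
--         return consonan_auxi(cadena, total, contador+1)
--     wow[contador] = "f"
--     cadena = "".join(wow)
--     return consonan_auxi(cadena, total, contador+1)
-- ===== SOURCE B (Python) =====
-- def consonan_auxi(cadena, total, contador):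
--     wow = list(cadena)
--     for i in range(contador, total):
--         if cadena[i] not in "aeiou ":
--             wow[i] = "f"
--     return "".join(wow)
-- ===== Notes on version B (the rewrite author's own statement) =====
-- stated objective: simpler
-- what changed: Replaces A's tail recursion that rebuilds the whole string with join(list(...)) at every consonant by a single explicit loop over range(contador, total) mutating one char list, joined once at the end.
import Mathlib
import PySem

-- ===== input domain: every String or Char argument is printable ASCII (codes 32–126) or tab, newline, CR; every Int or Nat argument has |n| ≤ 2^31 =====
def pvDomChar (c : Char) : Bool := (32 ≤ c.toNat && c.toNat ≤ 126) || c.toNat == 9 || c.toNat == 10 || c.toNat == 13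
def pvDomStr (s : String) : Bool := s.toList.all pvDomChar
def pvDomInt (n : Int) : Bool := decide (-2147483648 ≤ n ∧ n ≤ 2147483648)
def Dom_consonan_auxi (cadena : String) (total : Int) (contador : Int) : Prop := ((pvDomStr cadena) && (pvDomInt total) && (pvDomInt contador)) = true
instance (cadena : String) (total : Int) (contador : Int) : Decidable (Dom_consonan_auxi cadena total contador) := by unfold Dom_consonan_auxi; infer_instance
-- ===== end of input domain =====

-- B replaces A's tail recursion (which re-joins the whole string at every consonant) by a
-- single loop over range(contador, total) mutating one char list, joined once (objective: simpler).

-- ===== PORT A =====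
-- Literal port of A's tail recursion. Python's cadena[contador] raises IndexError exactly
-- where pyGet? is none (that case, excluded by Pre_, returns cadena as a dummy value).
def consonan_auxi (cadena : String) (total : Int) (contador : Int) : String :=
  if contador ≥ total then cadena
  else
    let wow := cadena.toList
    match PySem.List.pyGet? wow contador with
    | none => cadena  -- Python raises IndexError here; outside Pre_
    | some c =>
      if c = 'a' ∨ c = 'e' ∨ c = 'i' ∨ c = 'o' ∨ c = 'u' ∨ c = ' ' then
        consonan_auxi cadena total (contador + 1)
      else
        consonan_auxi (String.ofList (PySem.List.pySetD wow contador 'f')) total (contador + 1)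
  termination_by (total - contador).toNat
  decreasing_by all_goals omega

-- ===== PORT B =====
-- Literal port of Source B: wow = list(cadena); for i in range(contador, total):
--   if cadena[i] not in "aeiou ": wow[i] = 'f';  return ''.join(wow).
def consonan_auxi_alt (cadena : String) (total : Int) (contador : Int) : String :=
  String.ofList ((PySem.List.pyRange contador total 1).foldl
    (fun wow i =>
      match PySem.List.pyGet? cadena.toList i with
      | none => wow  -- Python raises IndexError here; outside Pre_
      | some c =>
        if c ∈ "aeiou ".toList then wow
        else PySem.List.pySetD wow i 'f')
    cadena.toList)

-- ===== PRECONDITION & SPEC =====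
-- Pre_ excludes exactly the inputs on which the Python (A and B alike) raises IndexError:
-- a nonempty index range [contador, total) reaching outside [-len(cadena), len(cadena)).
def Pre_consonan_auxi (cadena : String) (total : Int) (contador : Int) : Prop :=
  total ≤ contador ∨ (-(cadena.toList.length : Int) ≤ contador ∧ total ≤ (cadena.toList.length : Int))
instance (cadena : String) (total : Int) (contador : Int) : Decidable (Pre_consonan_auxi cadena total contador) := by unfold Pre_consonan_auxi; infer_instance

def pvWitness_consonan_auxi : String × Int × Int := ("bravo cadet", 9, 2)

def Spec_consonan_auxi (cadena : String) (total : Int) (contador : Int) (out : String) : Prop := out = consonan_auxi_alt cadena total contador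
instance (cadena : String) (total : Int) (contador : Int) (out : String) : Decidable (Spec_consonan_auxi cadena total contador out) := by unfold Spec_consonan_auxi; infer_instance

-- ===== CLAIM (what is proved, stated in full; the proofs are below) =====
def Claim_equal_consonan_auxi : Prop := ∀ (cadena : String) (total : Int) (contador : Int), Dom_consonan_auxi cadena total contador → Pre_consonan_auxi cadena total contador → Spec_consonan_auxi cadena total contador (consonan_auxi cadena total contador)

-- ===== LEMMAS AND PROOFS =====

-- B's loop body, with the source string's characters abstracted as `orig`.
def pvStep (orig : List Char) (wow : List Char) (i : Int) : List Char :=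
  match PySem.List.pyGet? orig i with
  | none => wow
  | some c => if c ∈ "aeiou ".toList then wow else PySem.List.pySetD wow i 'f'

-- Python's normalized index for an in-range index i.
def pvIdx (n : Nat) (i : Int) : Nat := (if i < 0 then i + n else i).toNat

theorem pv_mem_iff (c : Char) :
    (c ∈ "aeiou ".toList) ↔ (c = 'a' ∨ c = 'e' ∨ c = 'i' ∨ c = 'o' ∨ c = 'u' ∨ c = ' ') := by
  have h : "aeiou ".toList = ['a','e','i','o','u',' '] := rfl
  rw [h]; simp

theorem pv_pyGet_inrange (xs : List Char) (i : Int)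
    (h1 : -(xs.length : Int) ≤ i) (h2 : i < xs.length) :
    PySem.List.pyGet? xs i = some (xs.getD (pvIdx xs.length i) 'x') := by
  by_cases hi : i < 0
  · have hk1 : 0 < (-i).toNat := by omega
    have hk2 : (-i).toNat ≤ xs.length := by omega
    have hii : i = -(((-i).toNat : Nat) : Int) := by omega
    rw [hii, PySem.List.pyGet?_neg_natCast _ _ hk1 hk2, ← hii]
    have hlt : xs.length - (-i).toNat < xs.length := by omega
    have : pvIdx xs.length i = xs.length - (-i).toNat := by unfold pvIdx; omega
    rw [List.getElem?_eq_getElem hlt, this, List.getD_eq_getElem?_getD,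
        List.getElem?_eq_getElem hlt]
    rfl
  · have h0 : 0 ≤ i := by omega
    rw [PySem.List.pyGet?_of_nonneg xs h0]
    have hlt : i.toNat < xs.length := by omega
    have : pvIdx xs.length i = i.toNat := by unfold pvIdx; omega
    rw [List.getElem?_eq_getElem hlt, this, List.getD_eq_getElem?_getD,
        List.getElem?_eq_getElem hlt]
    rfl

theorem pv_pySetD_inrange (xs : List Char) (i : Int) (v : Char)
    (h1 : -(xs.length : Int) ≤ i) (h2 : i < xs.length) :
    PySem.List.pySetD xs i v = xs.set (pvIdx xs.length i) v := by
  by_cases hi : i < 0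
  · simp only [PySem.List.pySetD, PySem.List.pySet?, PySem.List.pyIdx?]
    have : pvIdx xs.length i = (i + xs.length).toNat := by unfold pvIdx; omega
    rw [this]
    split_ifs with h
    · omega
    · simp only [Option.map_some, Option.getD_some]
      congr 1
      omega
  · rw [PySem.List.pySetD_of_nonneg xs v (by omega)]
    have : pvIdx xs.length i = i.toNat := by unfold pvIdx; omega
    rw [this]

theorem pv_getD_set (l : List Char) (i j : Nat) (a : Char) :
    (l.set i a).getD j 'x' = if i = j ∧ i < l.length then a else l.getD j 'x' := by
  simp only [List.getD_eq_getElem?_getD, List.getElem?_set]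
  split_ifs <;> simp_all
  omega

-- Main loop lemma: A's recursion from any intermediate string l equals B's fold from l,
-- provided l has the original length and agrees with orig on which positions hold vowels/spaces.
theorem pv_main (orig : List Char) (total : Int) :
    ∀ (k : Nat) (c : Int) (l : List Char),
      l.length = orig.length →
      (∀ j : Nat, j < orig.length →
        ((l.getD j 'x' ∈ "aeiou ".toList) ↔ (orig.getD j 'x' ∈ "aeiou ".toList))) →
      (c < total → (-(orig.length : Int) ≤ c ∧ total ≤ (orig.length : Int))) →
      (total - c).toNat = k →
      consonan_auxi (String.ofList l) total c
        = String.ofList ((PySem.List.pyRange c total 1).foldl (pvStep orig) l) := by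
  intro k
  induction k with
  | zero =>
    intro c l _ _ _ hk
    have hc : c ≥ total := by omega
    rw [consonan_auxi, if_pos hc, PySem.List.pyRange_one_eq_nil (by omega), List.foldl_nil]
  | succ k ih =>
    intro c l hlen hinv hpre hk
    have hc : c < total := by omega
    obtain ⟨hlo, hhi⟩ := hpre hc
    have hcn : c < (orig.length : Int) := by omega
    have hm : pvIdx orig.length c < orig.length := by unfold pvIdx; omega
    have hgetl : PySem.List.pyGet? l c = some (l.getD (pvIdx orig.length c) 'x') := by
      rw [pv_pyGet_inrange l c (by omega) (by omega)]
      unfold pvIdx; rw [hlen]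
    have hgeto : PySem.List.pyGet? orig c = some (orig.getD (pvIdx orig.length c) 'x') := by
      exact pv_pyGet_inrange orig c (by omega) (by omega)
    rw [consonan_auxi, if_neg (by omega),
        PySem.List.pyRange_one_cons hc, List.foldl_cons]
    simp only [String.toList_ofList]
    rw [hgetl]
    have hstep : pvStep orig l c =
        if orig.getD (pvIdx orig.length c) 'x' ∈ "aeiou ".toList then l
        else PySem.List.pySetD l c 'f' := by
      unfold pvStep; rw [hgeto]
    by_cases hv : l.getD (pvIdx orig.length c) 'x' ∈ "aeiou ".toList
    · have hvo : orig.getD (pvIdx orig.length c) 'x' ∈ "aeiou ".toList :=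
        (hinv _ hm).mp hv
      rw [hstep, if_pos hvo]
      simp only [if_pos ((pv_mem_iff _).mp hv)]
      exact ih (c + 1) l hlen hinv (fun h => ⟨by omega, hhi⟩) (by omega)
    · have hvo : ¬ orig.getD (pvIdx orig.length c) 'x' ∈ "aeiou ".toList :=
        fun h => hv ((hinv _ hm).mpr h)
      rw [hstep, if_neg hvo]
      simp only [if_neg (fun h => hv ((pv_mem_iff _).mpr h))]
      have hset : PySem.List.pySetD l c 'f' = l.set (pvIdx orig.length c) 'f' := by
        rw [pv_pySetD_inrange l c 'f' (by omega) (by omega)]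
        unfold pvIdx; rw [hlen]
      rw [hset]
      refine ih (c + 1) _ (by simp [hlen]) ?_ (fun h => ⟨by omega, hhi⟩) (by omega)
      intro j hj
      rw [pv_getD_set]
      split_ifs with h
      · obtain ⟨hij, _⟩ := h
        rw [← hij]
        constructor
        · intro hf; exact absurd hf (by decide)
        · intro ho; exact absurd ho hvo
      · exact hinv j hj

-- ===== VERDICT (by name: the statement is the Claim_ definition above) =====
theorem consonan_auxi_spec : Claim_equal_consonan_auxi := by
  intro cadena total contador _ hpre
  unfold Spec_consonan_auxi consonan_auxi_alt
  have h := pv_main cadena.toList total ((total - contador).toNat) contador cadena.toList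
    rfl (fun _ _ => Iff.rfl)
    (fun hc => by rcases hpre with h | ⟨h1, h2⟩ <;> [omega; exact ⟨h1, h2⟩]) rfl
  rw [String.ofList_toList] at h
  rw [h]
  rfl
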